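-- pv_equiv track=rewrite | github.com/Ravster99/DecisionTree | dt-learn.py | PositiveAndNegative
-- ===== SOURCE A (Python) =====
-- def PositiveAndNegative(data): #Function to determine the number of positive and negative instances in the data.
--     positive, negative = 0, 0
--     for Data_Point in data['class']:
--             if (Data_Point == 'positive'):
--                 positive+= 1
--             else:
--                 negative+= 1
--     return positive, negative
-- ===== SOURCE B (Python) =====
-- def PositiveAndNegative(data):
--     # Divide and conquer: split the class column in half, count each half
--     # recursively, and add the (positive, negative) pairs component-wise.
--     def go(cls):
--         if not cls:
--             return (0, 0)
--         if len(cls) == 1: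
--             return (1, 0) if cls[0] == 'positive' else (0, 1)
--         mid = len(cls) // 2
--         p1, n1 = go(cls[:mid])
--         p2, n2 = go(cls[mid:])
--         return (p1 + p2, n1 + n2)
--     return go(data['class'])
-- ===== Notes on version B (the rewrite author's own statement) =====
-- stated objective: alternative
-- what changed: B replaces A's single iterative pass with two accumulators by a divide-and-conquer recursion: split the class list in half, count each half recursively, and add the (positive, negative) pairs component-wise; correct because the counts are additive over concatenation.
import Mathlib
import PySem

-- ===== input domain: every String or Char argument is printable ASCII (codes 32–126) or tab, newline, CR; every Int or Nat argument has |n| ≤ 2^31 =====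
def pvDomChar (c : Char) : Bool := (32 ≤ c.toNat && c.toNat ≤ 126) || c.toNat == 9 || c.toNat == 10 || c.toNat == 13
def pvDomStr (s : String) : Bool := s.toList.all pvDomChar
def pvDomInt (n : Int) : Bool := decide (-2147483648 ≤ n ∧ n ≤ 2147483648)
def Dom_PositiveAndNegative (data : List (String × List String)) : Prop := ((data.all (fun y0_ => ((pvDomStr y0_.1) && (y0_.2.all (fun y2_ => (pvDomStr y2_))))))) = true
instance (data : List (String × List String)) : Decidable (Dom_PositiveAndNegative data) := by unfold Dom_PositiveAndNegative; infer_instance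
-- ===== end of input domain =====

-- B replaces A's iterative dual-accumulator pass by a divide-and-conquer recursion
-- (split in half, recurse, add the pairs); objective: alternative decomposition.

-- ===== PORT A =====
def PositiveAndNegative (data : List (String × List String)) : Int × Int :=
  ((data.lookup "class").getD []).foldl
    (fun (pn : Int × Int) dp => if dp == "positive" then (pn.1 + 1, pn.2) else (pn.1, pn.2 + 1))
    (0, 0)

-- ===== PORT B =====
-- 'go' in Source B: divide and conquer over the class list (cls[:mid] / cls[mid:] = take/drop).
def pnGo (cls : List String) : Int × Int :=
  if _h0 : cls = [] then (0, 0)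
  else if _h1 : cls.length = 1 then
    (if cls.headI == "positive" then ((1 : Int), (0 : Int)) else (0, 1))
  else
    let mid := cls.length / 2
    let r1 := pnGo (cls.take mid)
    let r2 := pnGo (cls.drop mid)
    (r1.1 + r2.1, r1.2 + r2.2)
termination_by cls.length
decreasing_by
  · have : cls.length ≠ 0 := by simpa using List.length_eq_zero_iff.not.mpr _h0
    simp only [List.length_take]; omega
  · have : cls.length ≠ 0 := by simpa using List.length_eq_zero_iff.not.mpr _h0
    simp only [List.length_drop]; omega

def PositiveAndNegative_alt (data : List (String × List String)) : Int × Int :=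
  pnGo ((data.lookup "class").getD [])

-- ===== PRECONDITION & SPEC =====
-- Pre_ excludes inputs without a "class" key, on which Python A raises KeyError.
def Pre_PositiveAndNegative (data : List (String × List String)) : Prop :=
  (data.lookup "class").isSome = true
instance (data : List (String × List String)) : Decidable (Pre_PositiveAndNegative data) := by
  unfold Pre_PositiveAndNegative; infer_instance
def pvWitness_PositiveAndNegative : (List (String × List String)) :=
  [("class", ["positive", "negative", "positive"])]

def Spec_PositiveAndNegative (data : List (String × List String)) (out : Int × Int) : Prop := out = PositiveAndNegative_alt data
instance (data : List (String × List String)) (out : Int × Int) : Decidable (Spec_PositiveAndNegative data out) := by unfold Spec_PositiveAndNegative; infer_instance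

-- ===== CLAIM (what is proved, stated in full; the proofs are below) =====
def Claim_equal_PositiveAndNegative : Prop := ∀ (data : List (String × List String)), Dom_PositiveAndNegative data → Pre_PositiveAndNegative data → Spec_PositiveAndNegative data (PositiveAndNegative data)

-- ===== LEMMAS AND PROOFS =====
-- Both programs compute (count of "positive", count of others); characterise each side.

theorem pnGo_eq (cls : List String) :
    pnGo cls = (((cls.countP (fun x => x == "positive") : Nat) : Int),
                (cls.length : Int) - (cls.countP (fun x => x == "positive") : Nat)) := by
  induction cls using pnGo.induct with
  | case1 => simp [pnGo]
  | case2 cls h0 h1 hx =>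
    match cls, h1 with
    | [x], _ => simp [pnGo] at hx ⊢; simp [hx]
  | case3 cls h0 h1 hx =>
    match cls, h1 with
    | [x], _ => simp [pnGo] at hx ⊢; simp [hx]
  | case4 cls h0 h1 _mid ih1 ih2 =>
    rw [pnGo]
    simp only [dif_neg h0, dif_neg h1]
    have e : _mid = cls.length / 2 := rfl
    rw [e] at ih1 ih2
    rw [ih1, ih2]
    have hc : (cls.take (cls.length / 2)).countP (fun x => x == "positive")
        + (cls.drop (cls.length / 2)).countP (fun x => x == "positive")
        = cls.countP (fun x => x == "positive") := by
      rw [← List.countP_append, List.take_append_drop]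
    have hl : (cls.take (cls.length / 2)).length + (cls.drop (cls.length / 2)).length
        = cls.length := by
      rw [← List.length_append, List.take_append_drop]
    simp only [Prod.mk.injEq]
    constructor <;> omega

theorem pn_foldl (l : List String) (p n : Int) :
    l.foldl (fun (pn : Int × Int) dp => if dp == "positive" then (pn.1 + 1, pn.2) else (pn.1, pn.2 + 1)) (p, n)
      = (p + (l.countP (fun x => x == "positive") : Nat),
         n + ((l.length : Int) - (l.countP (fun x => x == "positive") : Nat))) := by
  induction l generalizing p n with
  | nil => simp
  | cons x xs ih =>
    rw [List.foldl_cons]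
    by_cases h : x = "positive"
    · have hb : (x == "positive") = true := by simp [h]
      rw [if_pos hb, ih]
      simp only [List.countP_cons, hb, List.length_cons, Prod.mk.injEq]
      constructor <;> push_cast <;> ring
    · have hb : (x == "positive") = false := by simp [h]
      rw [if_neg (by simp [hb]), ih]
      simp only [List.countP_cons, hb, List.length_cons, Prod.mk.injEq]
      constructor <;> push_cast <;> ring

-- ===== VERDICT (by name: the statement is the Claim_ definition above) =====
theorem PositiveAndNegative_spec : Claim_equal_PositiveAndNegative := by
  intro data _ _
  unfold Spec_PositiveAndNegative PositiveAndNegative PositiveAndNegative_alt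
  rw [pn_foldl, pnGo_eq]
  simp
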